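-- pv_equiv track=rewrite | github.com/TensorSpeech/TensorFlowTTS | tensorflow_tts/processor/libritts.py | clean_g2p
-- ===== SOURCE A (Python) =====
-- def clean_g2p(g2p_text: list):
--     data = []
--     for i, txt in enumerate(g2p_text):
--         if i == len(g2p_text) - 1:
--             if txt != " " and txt != "SIL":
--                 data.append("@" + txt)
--             else:
--                 data.append(
--                     "@END"
--                 )  # TODO try learning without end token and compare results
--             break
--         if txt != " ":
--             data.append("@" + txt)
--     return data
-- ===== SOURCE B (Python) =====
-- def clean_g2p(g2p_text: list):
--     if not g2p_text:
--         return []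
--     # build the output back-to-front over the reversed list:
--     # the end token comes first, then the kept non-space tokens.
--     rev = g2p_text[::-1]
--     last = rev[0]
--     out = ["@" + last if last != " " and last != "SIL" else "@END"]
--     for txt in rev[1:]:
--         if txt != " ":
--             out.append("@" + txt)
--     out.reverse()
--     return out
-- ===== Notes on version B (the rewrite author's own statement) =====
-- stated objective: alternative
-- what changed: B builds the output back-to-front: it reverses the input, emits the end token first from the head of the reversed list, then appends the kept non-space tokens and reverses the result, instead of A's forward indexed loop with an in-loop last-index check and break.
import Mathlib
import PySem

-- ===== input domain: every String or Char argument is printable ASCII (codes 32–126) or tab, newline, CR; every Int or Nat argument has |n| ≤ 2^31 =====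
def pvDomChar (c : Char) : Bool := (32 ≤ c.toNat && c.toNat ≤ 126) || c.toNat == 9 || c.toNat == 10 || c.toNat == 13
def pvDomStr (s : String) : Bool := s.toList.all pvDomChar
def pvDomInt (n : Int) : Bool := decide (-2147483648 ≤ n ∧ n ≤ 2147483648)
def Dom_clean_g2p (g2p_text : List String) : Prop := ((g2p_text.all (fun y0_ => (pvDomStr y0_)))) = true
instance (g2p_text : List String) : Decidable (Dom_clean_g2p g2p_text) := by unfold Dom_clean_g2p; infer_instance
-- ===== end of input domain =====

-- B builds the output back-to-front over the reversed input (end token first, then kept tokens, final reverse); equivalence is exact on all inputs.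

-- ===== PORT A =====
-- A's enumerate-loop with in-loop index check and break, transliterated:
-- i is the running index, n = len(g2p_text), data the accumulator.
def cleanA_go (n : Nat) (i : Nat) (xs : List String) (data : List String) : List String :=
  match xs with
  | [] => data
  | txt :: rest =>
    if i = n - 1 then
      if txt ≠ " " ∧ txt ≠ "SIL" then data ++ ["@" ++ txt] else data ++ ["@END"]
    else
      if txt ≠ " " then cleanA_go n (i + 1) rest (data ++ ["@" ++ txt])
      else cleanA_go n (i + 1) rest data

def clean_g2p (g2p_text : List String) : List String :=
  cleanA_go g2p_text.length 0 g2p_text []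

-- ===== PORT B =====
-- B: rev = g2p_text[::-1]; out starts with the end token for rev[0];
-- the loop over rev[1:] appends kept tokens; out.reverse() at the end.
def clean_g2p_alt (g2p_text : List String) : List String :=
  match g2p_text.reverse with
  | [] => []
  | last :: restRev =>
    (restRev.foldl (fun out txt => if txt ≠ " " then out ++ ["@" ++ txt] else out)
      [if last ≠ " " ∧ last ≠ "SIL" then "@" ++ last else "@END"]).reverse

-- ===== PRECONDITION & SPEC =====
def Spec_clean_g2p (g2p_text : List String) (out : List String) : Prop := out = clean_g2p_alt g2p_text
instance (g2p_text : List String) (out : List String) : Decidable (Spec_clean_g2p g2p_text out) := by unfold Spec_clean_g2p; infer_instance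

-- ===== CLAIM (what is proved, stated in full; the proofs are below) =====
def Claim_equal_clean_g2p : Prop := ∀ (g2p_text : List String), Dom_clean_g2p g2p_text → Spec_clean_g2p g2p_text (clean_g2p g2p_text)

-- ===== LEMMAS AND PROOFS =====
-- A's loop equals: bulk (filtered, '@'-prefixed all-but-last) ++ the end token.
theorem cleanA_go_eq (xs : List String) (hne : xs ≠ []) :
    ∀ (n i : Nat) (data : List String), i + xs.length = n →
    cleanA_go n i xs data =
      data ++ ((xs.dropLast.filter (fun t => t ≠ " ")).map (fun t => "@" ++ t)) ++
        [if xs.getLast hne ≠ " " ∧ xs.getLast hne ≠ "SIL"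
          then "@" ++ xs.getLast hne else "@END"] := by
  induction xs with
  | nil => exact absurd rfl hne
  | cons txt rest ih =>
    intro n i data hn
    match rest, hn with
    | [], hn =>
      have hn1 : i + 1 = n := by simpa using hn
      have hi : i = n - 1 := by omega
      simp only [cleanA_go, if_pos hi, List.getLast]
      split_ifs <;> simp
    | t2 :: r2, hn =>
      have hn' : i + (r2.length + 2) = n := by simpa using hn
      have hi : i ≠ n - 1 := by omega
      have hrec : (i + 1) + (t2 :: r2).length = n := by simp at hn ⊢; omega
      have hgl : (txt :: t2 :: r2).getLast hne = (t2 :: r2).getLast (by simp) := by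
        simp [List.getLast]
      rw [show cleanA_go n i (txt :: t2 :: r2) data =
          (if txt ≠ " " then cleanA_go n (i+1) (t2 :: r2) (data ++ ["@" ++ txt])
           else cleanA_go n (i+1) (t2 :: r2) data) from by
        simp [cleanA_go, hi]]
      by_cases hsp : txt = " "
      · simp [hsp, ih (by simp) n (i+1) data hrec]
      · simp [hsp, ih (by simp) n (i+1) (data ++ ["@" ++ txt]) hrec]

-- B's append-loop equals init ++ the filtered, '@'-prefixed tokens.
theorem cleanB_foldl (rs : List String) :
    ∀ (init : List String),
    rs.foldl (fun out txt => if txt ≠ " " then out ++ ["@" ++ txt] else out) init =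
      init ++ (rs.filter (fun t => t ≠ " ")).map (fun t => "@" ++ t) := by
  induction rs with
  | nil => simp
  | cons r rest ih =>
    intro init
    rw [List.foldl_cons]
    by_cases hsp : r = " "
    · rw [if_neg (by simp [hsp]), ih]
      simp [hsp]
    · rw [if_pos hsp, ih (init ++ ["@" ++ r])]
      simp [hsp]

-- ===== VERDICT (by name: the statement is the Claim_ definition above) =====
theorem clean_g2p_spec : Claim_equal_clean_g2p := by
  intro xs _
  show clean_g2p xs = clean_g2p_alt xs
  cases hx : xs.reverse with
  | nil =>
    have : xs = [] := by simpa using congrArg List.reverse hx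
    simp [this, clean_g2p, cleanA_go, clean_g2p_alt]
  | cons last restRev =>
    have hxs : xs = restRev.reverse ++ [last] := by
      have := congrArg List.reverse hx
      simpa using this
    have hne : xs ≠ [] := by rw [hxs]; simp
    rw [clean_g2p, cleanA_go_eq xs hne _ 0 [] (by simp)]
    have hB : clean_g2p_alt xs =
        (restRev.foldl (fun out txt => if txt ≠ " " then out ++ ["@" ++ txt] else out)
          [if last ≠ " " ∧ last ≠ "SIL" then "@" ++ last else "@END"]).reverse := by
      unfold clean_g2p_alt
      rw [hx]
    rw [hB, cleanB_foldl]
    have hdl : xs.dropLast = restRev.reverse := by rw [hxs]; simp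
    have hgl : xs.getLast hne = last := by
      rw [List.getLast_eq_iff_getLast?_eq_some, hxs]
      simp
    rw [hdl, hgl]
    simp [List.filter_reverse, List.map_reverse]
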